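-- pv_equiv track=rewrite | github.com/simonpechacek/selection-of-code-for-siemens | ALP/domaci_prace/ukol3/translate.py | validate_num
-- ===== SOURCE A (Python) =====
-- def validate_num(string: str):
--     dots = 0
--     nums = 0
--     nums_after = 0
--     for let in string:
--         if let not in ["0", "1", "2", "3", "4", "5", "6", "7", "8", "9", "."]:
--             return False
--         if dots == 0 and let != ".":
--             nums += 1
--         if dots == 1 and let != ".":
--             nums_after += 1
--         if let == ".":
--             dots += 1
--             if dots > 1:
--                 return False
--
--     if nums > 0 and nums_after > 0:
--         return True
--     return False
-- ===== SOURCE B (Python) =====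
-- def validate_num(string: str):
--     parts = string.split('.')
--     if len(parts) != 2:
--         return False
--     left, right = parts
--     if not left or not right:
--         return False
--     return all(c in '0123456789' for c in left) and all(c in '0123456789' for c in right)
-- ===== Notes on version B (the rewrite author's own statement) =====
-- stated objective: simpler
-- what changed: Replaced the character-by-character counter state machine with a split-at-the-dot-then-validate-each-side decomposition (exactly two nonempty parts, all chars ASCII digits).
import Mathlib
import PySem

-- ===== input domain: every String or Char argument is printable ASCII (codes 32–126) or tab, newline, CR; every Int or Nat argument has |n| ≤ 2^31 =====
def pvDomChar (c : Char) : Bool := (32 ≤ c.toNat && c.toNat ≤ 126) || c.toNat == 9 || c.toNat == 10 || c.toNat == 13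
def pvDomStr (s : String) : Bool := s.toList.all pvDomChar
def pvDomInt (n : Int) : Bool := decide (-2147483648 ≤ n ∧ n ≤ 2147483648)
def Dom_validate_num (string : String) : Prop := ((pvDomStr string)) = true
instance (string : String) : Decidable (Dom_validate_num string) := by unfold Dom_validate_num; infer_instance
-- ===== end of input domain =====

-- B replaces A's character-by-character counter state machine with a split at the dot
-- and per-segment validation (exactly two nonempty all-digit parts); objective: simpler.

-- ===== PORT A =====
-- the literal list ["0",…,"9","."] of A's membership test
def pvAllowed : List Char := ['0', '1', '2', '3', '4', '5', '6', '7', '8', '9', '.']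

-- A's loop over the characters, carrying (dots, nums, nums_after); early `return False` = result false
def validate_num_go : List Char → Nat → Nat → Nat → Bool
  | [], _, nums, nums_after => decide (0 < nums) && decide (0 < nums_after)
  | c :: rest, dots, nums, nums_after =>
    if (pvAllowed.contains c) = false then false
    else
      let nums' := if dots = 0 ∧ c ≠ '.' then nums + 1 else nums
      let na' := if dots = 1 ∧ c ≠ '.' then nums_after + 1 else nums_after
      if c = '.' then
        if 1 < dots + 1 then false else validate_num_go rest (dots + 1) nums' na'
      else validate_num_go rest dots nums' na'

def validate_num (string : String) : Bool :=
  validate_num_go string.toList 0 0 0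

-- ===== PORT B =====
-- c in '0123456789'
def pvIsDig (c : Char) : Bool := ("0123456789".toList).contains c

def validate_num_alt (string : String) : Bool :=
  match PySem.Chars.splitOn string.toList ['.'] with
  | [left, right] =>
    if left.isEmpty || right.isEmpty then false
    else left.all pvIsDig && right.all pvIsDig
  | _ => false

-- ===== PRECONDITION & SPEC =====
def Spec_validate_num (string : String) (out : Bool) : Prop := out = validate_num_alt string
instance (string : String) (out : Bool) : Decidable (Spec_validate_num string out) := by unfold Spec_validate_num; infer_instance

-- ===== CLAIM (what is proved, stated in full; the proofs are below) =====
def Claim_equal_validate_num : Prop := ∀ (string : String), Dom_validate_num string → Spec_validate_num string (validate_num string)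

-- ===== LEMMAS AND PROOFS =====

-- reference single-char split: splitDot pre cs splits cs at '.', with pre prepended to the first piece
def splitDot (pre : List Char) : List Char → List (List Char)
  | [] => [pre]
  | c :: rest => if c = '.' then pre :: splitDot [] rest else splitDot (pre ++ [c]) rest

theorem splitOn_go_eq_splitDot :
    ∀ (fuel : Nat) (l cur : List Char) (acc : List (List Char)), l.length < fuel →
      PySem.Chars.splitOn.go ['.'] fuel l cur acc = acc.reverse ++ splitDot cur.reverse l := by
  intro fuel
  induction fuel with
  | zero => intro l cur acc h; omega
  | succ n ih =>
    intro l cur acc h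
    cases l with
    | nil => simp [PySem.Chars.splitOn.go, splitDot]
    | cons c rest =>
      by_cases hc : c = '.'
      · subst hc
        have hp : List.isPrefixOf ['.'] ('.' :: rest) = true := by
          simp [List.isPrefixOf]
        rw [PySem.Chars.splitOn.go, hp]
        simp only [if_true, List.length_singleton,
          List.drop_succ_cons, List.drop_zero]
        rw [ih rest [] (cur.reverse :: acc) (by simp at h; omega)]
        simp [splitDot]
      · have hp : List.isPrefixOf ['.'] (c :: rest) = false := by
          simp [List.isPrefixOf]; exact fun h => absurd h.symm hc
        rw [PySem.Chars.splitOn.go, hp]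
        simp only [Bool.false_eq_true, if_false]
        rw [ih rest (c :: cur) acc (by simp at h ⊢; omega)]
        simp [splitDot, hc]

theorem splitOn_eq_splitDot (cs : List Char) :
    PySem.Chars.splitOn cs ['.'] = splitDot [] cs := by
  rw [PySem.Chars.splitOn, splitOn_go_eq_splitDot (cs.length + 1) cs [] [] (by omega)]
  rfl

-- splitDot with a nonempty prefix just extends the first piece
theorem splitDot_pre (cs : List Char) :
    ∃ h t, splitDot [] cs = h :: t ∧ ∀ p : List Char, splitDot p cs = (p ++ h) :: t := by
  induction cs with
  | nil => exact ⟨[], [], by simp [splitDot], fun p => by simp [splitDot]⟩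
  | cons c rest ih =>
    by_cases hc : c = '.'
    · subst hc
      exact ⟨[], splitDot [] rest, by simp [splitDot], fun p => by simp [splitDot]⟩
    · obtain ⟨h, t, h1, h2⟩ := ih
      refine ⟨c :: h, t, ?_, ?_⟩
      · show splitDot [] (c :: rest) = _
        rw [splitDot, if_neg hc]
        simpa using h2 [c]
      · intro p
        rw [splitDot, if_neg hc, h2 (p ++ [c])]
        simp

-- the value A computes, phrased over the split pieces
def pvCheck (parts : List (List Char)) (nums : Nat) : Bool :=
  match parts with
  | [l, r] => l.all pvIsDig && r.all pvIsDig && decide (0 < nums + l.length) && decide (0 < r.length)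
  | _ => false

theorem dot_not_dig : pvIsDig '.' = false := by decide

theorem splitDot_no_dot (cs : List Char) (h : '.' ∉ cs) : ∀ pre, splitDot pre cs = [pre ++ cs] := by
  induction cs with
  | nil => simp [splitDot]
  | cons c rest ih =>
    intro pre
    simp only [List.mem_cons, not_or] at h
    rw [splitDot, if_neg (fun hh => h.1 hh.symm), ih h.2]
    simp

theorem splitDot_has_dot (cs : List Char) (h : '.' ∈ cs) :
    ∀ pre, 2 ≤ (splitDot pre cs).length := by
  induction cs with
  | nil => simp at h
  | cons c rest ih =>
    intro pre
    by_cases hc : c = '.'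
    · subst hc
      rw [splitDot, if_pos rfl]
      obtain ⟨hh, tt, h1, -⟩ := splitDot_pre rest
      simp [h1]
    · have hr : '.' ∈ rest := by
        rcases List.mem_cons.mp h with h' | h'
        · exact absurd h'.symm hc
        · exact h'
      rw [splitDot, if_neg hc]
      exact ih hr _

-- A's loop after the (single) dot: everything must be a digit, and both sides nonempty
theorem go_after_dot (cs : List Char) :
    ∀ nums na, validate_num_go cs 1 nums na =
      (cs.all pvIsDig && decide (0 < nums) && decide (0 < na + cs.length)) := by
  induction cs with
  | nil => intro nums na; simp [validate_num_go]
  | cons c rest ih =>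
    intro nums na
    by_cases hc : c = '.'
    · subst hc
      rw [validate_num_go]
      simp [pvAllowed, dot_not_dig]
    · by_cases hd : pvIsDig c = true
      · have hall : pvAllowed.contains c = true := by
          simp [pvAllowed]; simp [pvIsDig] at hd; tauto
        rw [validate_num_go, hall]
        simp only [ne_eq, hc, not_false_eq_true, and_true, Bool.true_eq_false, if_false]
        norm_num
        rw [ih]
        simp [hd]
      · have hall : pvAllowed.contains c = false := by
          simp [pvIsDig] at hd; simp [pvAllowed]
          push Not; refine ⟨?_, ?_, ?_, ?_, ?_, ?_, ?_, ?_, ?_, ?_, hc⟩ <;> tauto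
        rw [validate_num_go, hall]
        simp [hd]

-- A's loop before any dot equals pvCheck of the split
theorem go_before_dot (cs : List Char) :
    ∀ nums, validate_num_go cs 0 nums 0 = pvCheck (splitDot [] cs) nums := by
  induction cs with
  | nil => intro nums; simp [validate_num_go, splitDot, pvCheck]
  | cons c rest ih =>
    intro nums
    by_cases hc : c = '.'
    · subst hc
      rw [validate_num_go]
      simp only [pvAllowed]
      norm_num
      rw [go_after_dot]
      show _ = pvCheck (splitDot [] ('.' :: rest)) nums
      rw [splitDot, if_pos rfl]
      by_cases hdot : '.' ∈ rest
      · have h2 := splitDot_has_dot rest hdot []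
        have hfalse : rest.all pvIsDig = false := by
          rw [List.all_eq_false]; exact ⟨'.', hdot, by simp [dot_not_dig]⟩
        rw [hfalse]
        cases h : splitDot [] rest with
        | nil => simp [pvCheck]
        | cons a t =>
          cases t with
          | nil => rw [h] at h2; simp at h2
          | cons b t2 =>
            cases t2 with
            | nil =>
              -- both sides are false: rest contains '.', and the split has three pieces
              simp only [Bool.false_and]
              simp [pvCheck]
            | cons _ _ => simp [pvCheck]
      · rw [splitDot_no_dot rest hdot []]
        simp [pvCheck]
        try rfl
    · by_cases hd : pvIsDig c = true
      · have hall : pvAllowed.contains c = true := by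
          simp [pvAllowed]; simp [pvIsDig] at hd; tauto
        rw [validate_num_go, hall]
        simp only [ne_eq, hc, not_false_eq_true, and_true, Bool.true_eq_false, if_false]
        norm_num
        rw [ih (nums + 1)]
        rw [splitDot, if_neg hc]
        obtain ⟨h, t, h1, h2⟩ := splitDot_pre rest
        rw [h1, h2]
        cases t with
        | nil => simp [pvCheck]
        | cons b t2 =>
          cases t2 with
          | nil => simp [pvCheck, hd]
          | cons _ _ => simp [pvCheck]
      · have hall : pvAllowed.contains c = false := by
          simp [pvIsDig] at hd; simp [pvAllowed]
          push Not; refine ⟨?_, ?_, ?_, ?_, ?_, ?_, ?_, ?_, ?_, ?_, hc⟩ <;> tauto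
        rw [validate_num_go, hall]
        have hd' : pvIsDig c = false := by simpa using hd
        obtain ⟨h, t, h1, h2⟩ := splitDot_pre rest
        have e : splitDot [] (c :: rest) = (c :: h) :: t := by
          rw [splitDot, if_neg hc]; simpa using h2 [c]
        rw [e]
        cases t with
        | nil => simp [pvCheck]
        | cons b t2 =>
          cases t2 with
          | nil => simp [pvCheck, hd']
          | cons _ _ => simp [pvCheck]

theorem check_eq_alt (parts : List (List Char)) :
    pvCheck parts 0 =
      (match parts with
       | [left, right] =>
         if left.isEmpty || right.isEmpty then false
         else left.all pvIsDig && right.all pvIsDig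
       | _ => false) := by
  match parts with
  | [] => rfl
  | [_] => rfl
  | [l, r] =>
    cases l <;> cases r <;> simp [pvCheck]
  | _ :: _ :: _ :: _ => rfl

-- ===== VERDICT (by name: the statement is the Claim_ definition above) =====
theorem validate_num_spec : Claim_equal_validate_num := by
  intro s _
  show validate_num s = validate_num_alt s
  rw [validate_num, validate_num_alt, go_before_dot, splitOn_eq_splitDot, check_eq_alt]
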